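-- pv_equiv track=rewrite | github.com/ckoons/BubbleSpacetimeTheory | play/toy_254_a5_nonspherical.py | _dim_B
-- ===== SOURCE A (Python) =====
-- def _dim_B(p, q, r):
--     """Type B_r: SO(2r+1), weight (p, q, 0, ..., 0)."""
--     lam = [0] * (r + 1)
--     lam[1] = p
--     lam[2] = q
--     L = [0] * (r + 1)
--     P = [0] * (r + 1)
--     for i in range(1, r + 1):
--         P[i] = 2 * r - 2 * i + 1
--         L[i] = 2 * lam[i] + P[i]
--     num = 1
--     den = 1
--     for i in range(1, r + 1):
--         for j in range(i + 1, r + 1):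
--             num *= (L[i] * L[i] - L[j] * L[j])
--             den *= (P[i] * P[i] - P[j] * P[j])
--     for i in range(1, r + 1):
--         num *= L[i]
--         den *= P[i]
--     return num // den
-- ===== SOURCE B (Python) =====
-- def _dim_B(p, q, r):
--     """Type B_r: SO(2r+1), weight (p, q, 0, ..., 0).
--
--     For indices i >= 3 the weight is 0, so L[i] = P[i] and every Weyl factor
--     involving only such indices cancels between numerator and denominator.
--     Only the O(r) factors involving index 1 or 2 remain.
--     """
--     a = 2 * r - 1          # P[1]
--     b = 2 * r - 3          # P[2]
--     l1 = 2 * p + a         # L[1]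
--     l2 = 2 * q + b         # L[2]
--     num = l1 * l2 * (l1 * l1 - l2 * l2)
--     den = a * b * (a * a - b * b)
--     for j in range(3, r + 1):
--         pj = 2 * r - 2 * j + 1
--         num *= (l1 * l1 - pj * pj) * (l2 * l2 - pj * pj)
--         den *= (a * a - pj * pj) * (b * b - pj * pj)
--     return num // den
-- ===== Notes on version B (the rewrite author's own statement) =====
-- stated objective: faster
-- what changed: For indices i>=3 the weight entry is 0, so L[i]=P[i] and all Weyl factors involving only such indices are identical in numerator and denominator; B cancels them and multiplies only the O(r) factors involving index 1 or 2, instead of A's O(r^2) double loop over all index pairs.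
import Mathlib
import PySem

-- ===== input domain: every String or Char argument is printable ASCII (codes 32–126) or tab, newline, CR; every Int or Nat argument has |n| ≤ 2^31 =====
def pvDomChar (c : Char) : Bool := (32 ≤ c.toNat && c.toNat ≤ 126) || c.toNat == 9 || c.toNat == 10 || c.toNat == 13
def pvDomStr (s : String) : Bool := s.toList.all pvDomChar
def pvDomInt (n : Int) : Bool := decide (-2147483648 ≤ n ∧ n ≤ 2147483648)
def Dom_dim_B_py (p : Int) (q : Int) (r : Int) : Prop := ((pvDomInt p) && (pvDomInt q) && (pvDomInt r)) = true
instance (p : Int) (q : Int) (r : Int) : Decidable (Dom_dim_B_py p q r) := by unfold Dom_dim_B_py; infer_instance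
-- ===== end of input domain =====

-- B cancels the Weyl factors that are identical in numerator and denominator (those involving
-- only indices ≥ 3, where the weight entry is 0), keeping only the factors with index 1 or 2: O(r) vs O(r^2).

-- ===== PORT A =====
-- Python lists here are written once per index; they are modelled as Int-indexed maps
-- (write = pointwise update, read = application). Pre_ gives r ≥ 2, so all writes/reads are in range.

-- body of A's first loop: P[i] = 2*r - 2*i + 1; L[i] = 2*lam[i] + P[i]
def dim_B_py_step (lam : Int → Int) (r : Int) (PL : (Int → Int) × (Int → Int)) (i : Int) :
    (Int → Int) × (Int → Int) :=
  let P' : Int → Int := fun j => if j = i then 2*r - 2*i + 1 else PL.1 j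
  let L' : Int → Int := fun j => if j = i then 2 * lam i + P' i else PL.2 j
  (P', L')

def dim_B_py (p : Int) (q : Int) (r : Int) : Int :=
  -- lam = [0]*(r+1); lam[1] = p; lam[2] = q
  let lam : Int → Int := fun i => if i = 2 then q else if i = 1 then p else 0
  let PL : (Int → Int) × (Int → Int) :=
    (PySem.List.pyRange 1 (r+1) 1).foldl (dim_B_py_step lam r) (fun _ => 0, fun _ => 0)
  let P := PL.1
  let L := PL.2
  -- num = den = 1; double loop over pairs i < j
  let nd : Int × Int :=
    (PySem.List.pyRange 1 (r+1) 1).foldl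
      (fun nd i =>
        (PySem.List.pyRange (i+1) (r+1) 1).foldl
          (fun nd j => (nd.1 * (L i * L i - L j * L j), nd.2 * (P i * P i - P j * P j)))
          nd)
      (1, 1)
  -- final loop: num *= L[i]; den *= P[i]
  let nd2 : Int × Int :=
    (PySem.List.pyRange 1 (r+1) 1).foldl (fun nd i => (nd.1 * L i, nd.2 * P i)) nd
  PySem.Int.floordiv nd2.1 nd2.2

-- ===== PORT B =====
def dim_B_py_alt (p : Int) (q : Int) (r : Int) : Int :=
  let a := 2*r - 1
  let b := 2*r - 3
  let l1 := 2*p + a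
  let l2 := 2*q + b
  let nd : Int × Int :=
    (PySem.List.pyRange 3 (r+1) 1).foldl
      (fun nd j =>
        let pj := 2*r - 2*j + 1
        (nd.1 * ((l1*l1 - pj*pj) * (l2*l2 - pj*pj)), nd.2 * ((a*a - pj*pj) * (b*b - pj*pj))))
      (l1 * l2 * (l1*l1 - l2*l2), a * b * (a*a - b*b))
  PySem.Int.floordiv nd.1 nd.2

-- ===== PRECONDITION & SPEC =====
-- Pre_ excludes r < 2, where Python A raises IndexError (lam[1] / lam[2] on a list of length r+1 < 3).
def Pre_dim_B_py (p : Int) (q : Int) (r : Int) : Prop := 2 ≤ r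
instance (p : Int) (q : Int) (r : Int) : Decidable (Pre_dim_B_py p q r) := by unfold Pre_dim_B_py; infer_instance
def pvWitness_dim_B_py : Int × Int × Int := (1, 0, 3)
def Spec_dim_B_py (p : Int) (q : Int) (r : Int) (out : Int) : Prop := out = dim_B_py_alt p q r
instance (p : Int) (q : Int) (r : Int) (out : Int) : Decidable (Spec_dim_B_py p q r out) := by unfold Spec_dim_B_py; infer_instance

-- ===== CLAIM (what is proved, stated in full; the proofs are below) =====
def Claim_equal_dim_B_py : Prop := ∀ (p : Int) (q : Int) (r : Int), Dom_dim_B_py p q r → Pre_dim_B_py p q r → Spec_dim_B_py p q r (dim_B_py p q r)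

-- ===== LEMMAS AND PROOFS =====

/-- the formula A's first loop stores in `P` -/
def pvPf (r i : Int) : Int := 2*r - 2*i + 1
/-- the formula A's first loop stores in `L` -/
def pvLf (p q r i : Int) : Int := 2 * (if i = 2 then q else if i = 1 then p else 0) + pvPf r i

/-- values of the array-building fold of A -/
theorem pv_PL_spec (lam : Int → Int) (r : Int) (l : List Int) (f g : Int → Int) (j : Int) :
    ((l.foldl (dim_B_py_step lam r) (f, g)).1 j = if j ∈ l then pvPf r j else f j)
    ∧ ((l.foldl (dim_B_py_step lam r) (f, g)).2 j = if j ∈ l then 2 * lam j + pvPf r j else g j) := by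
  induction l generalizing f g with
  | nil => simp
  | cons x t ih =>
    have hx1 : (dim_B_py_step lam r (f, g) x).1
        = fun j => if j = x then 2*r - 2*x + 1 else f j := by
      funext j; simp [dim_B_py_step]
    have hx2 : (dim_B_py_step lam r (f, g) x).2
        = fun j => if j = x then 2 * lam x + (2*r - 2*x + 1) else g j := by
      funext j; simp [dim_B_py_step]
    have hx : dim_B_py_step lam r (f, g) x
        = ((fun j => if j = x then 2*r - 2*x + 1 else f j),
           (fun j => if j = x then 2 * lam x + (2*r - 2*x + 1) else g j)) :=
      Prod.ext hx1 hx2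
    simp only [List.foldl_cons, List.mem_cons, hx]
    constructor
    · rw [(ih _ _).1]
      by_cases hjx : j = x <;> by_cases ht : j ∈ t <;> simp [hjx, ht, pvPf]
    · rw [(ih _ _).2]
      by_cases hjx : j = x <;> by_cases ht : j ∈ t <;> simp [hjx, ht, pvPf]

theorem pv_PL_fst (lam : Int → Int) (r : Int) (l : List Int) (j : Int) :
    (l.foldl (dim_B_py_step lam r) (fun _ => 0, fun _ => 0)).1 j
      = if j ∈ l then pvPf r j else 0 :=
  (pv_PL_spec lam r l (fun _ => 0) (fun _ => 0) j).1

theorem pv_PL_snd (lam : Int → Int) (r : Int) (l : List Int) (j : Int) :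
    (l.foldl (dim_B_py_step lam r) (fun _ => 0, fun _ => 0)).2 j
      = if j ∈ l then 2 * lam j + pvPf r j else 0 :=
  (pv_PL_spec lam r l (fun _ => 0) (fun _ => 0) j).2

/-- a multiplying fold is a product -/
theorem pv_foldl_mul (l : List Int) (f : Int → Int) (a : Int) :
    l.foldl (fun acc x => acc * f x) a = a * (l.map f).prod := by
  induction l generalizing a with
  | nil => simp
  | cons x t ih => simp [List.foldl_cons, ih, mul_assoc]

/-- a pair fold multiplying into both components is a pair of products -/
theorem pv_pairfold1 (l : List Int) (f g : Int → Int) (a b : Int) :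
    l.foldl (fun nd i => (nd.1 * f i, nd.2 * g i)) (a, b)
      = (a * (l.map f).prod, b * (l.map g).prod) := by
  rw [PySem.List.foldl_prod_mk (f := fun s e => s * f e) (g := fun s e => s * g e)]
  rw [pv_foldl_mul, pv_foldl_mul]

/-- the nested pair fold of A's double loop is a pair of double products -/
theorem pv_pairfold2 (l : List Int) (m : Int → List Int) (f g : Int → Int → Int) (a b : Int) :
    l.foldl (fun nd i => (m i).foldl (fun nd j => (nd.1 * f i j, nd.2 * g i j)) nd) (a, b)
      = (a * (l.map (fun i => ((m i).map (f i)).prod)).prod,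
         b * (l.map (fun i => ((m i).map (g i)).prod)).prod) := by
  induction l generalizing a b with
  | nil => simp
  | cons x t ih =>
    have hinner : ∀ s : Int × Int,
        (m x).foldl (fun nd j => (nd.1 * f x j, nd.2 * g x j)) s
          = (s.1 * ((m x).map (f x)).prod, s.2 * ((m x).map (g x)).prod) := by
      intro s
      calc (m x).foldl (fun nd j => (nd.1 * f x j, nd.2 * g x j)) s
          = (m x).foldl (fun nd j => (nd.1 * f x j, nd.2 * g x j)) (s.1, s.2) := rfl
        _ = _ := pv_pairfold1 _ _ _ _ _
    simp only [List.foldl_cons, hinner, ih]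
    simp [mul_assoc]

theorem pv_prod_pos (l : List Int) (f : Int → Int) (h : ∀ x ∈ l, 0 < f x) :
    0 < (l.map f).prod := by
  induction l with
  | nil => simp
  | cons x t ih =>
    simp only [List.map_cons, List.prod_cons]
    exact mul_pos (h x (by simp)) (ih fun y hy => h y (List.mem_cons_of_mem _ hy))

/-- floor division is invariant under cancelling a positive common factor -/
theorem pv_floordiv_cancel (n d k : Int) (hd : 0 < d) (hk : 0 < k) :
    PySem.Int.floordiv (n * k) (d * k) = PySem.Int.floordiv n d := by
  rw [PySem.Int.floordiv_eq_ediv_of_pos (mul_pos hd hk), PySem.Int.floordiv_eq_ediv_of_pos hd]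
  rw [mul_comm n k, mul_comm d k]
  exact Int.mul_ediv_mul_of_pos n d hk

theorem pv_if_L (p q r k : Int) (h1 : 1 ≤ k) (h2 : k < r+1) :
    (if k ∈ PySem.List.pyRange 1 (r+1) 1 then
        2 * (if k = 2 then q else if k = 1 then p else 0) + pvPf r k else 0)
      = pvLf p q r k := by
  rw [if_pos (PySem.List.mem_pyRange_one.mpr ⟨h1, h2⟩)]; rfl

theorem pv_if_P (r k : Int) (h1 : 1 ≤ k) (h2 : k < r+1) :
    (if k ∈ PySem.List.pyRange 1 (r+1) 1 then pvPf r k else 0) = pvPf r k := by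
  rw [if_pos (PySem.List.mem_pyRange_one.mpr ⟨h1, h2⟩)]

/-- closed product form of A's result -/
theorem pv_A_closed (p q r : Int) :
    dim_B_py p q r =
      PySem.Int.floordiv
        (((PySem.List.pyRange 1 (r+1) 1).map (fun i =>
            ((PySem.List.pyRange (i+1) (r+1) 1).map (fun j =>
              pvLf p q r i * pvLf p q r i - pvLf p q r j * pvLf p q r j)).prod)).prod
          * ((PySem.List.pyRange 1 (r+1) 1).map (pvLf p q r)).prod)
        (((PySem.List.pyRange 1 (r+1) 1).map (fun i =>
            ((PySem.List.pyRange (i+1) (r+1) 1).map (fun j =>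
              pvPf r i * pvPf r i - pvPf r j * pvPf r j)).prod)).prod
          * ((PySem.List.pyRange 1 (r+1) 1).map (pvPf r)).prod) := by
  simp only [dim_B_py, pv_PL_fst, pv_PL_snd]
  rw [pv_pairfold2, pv_pairfold1]
  dsimp only
  congr 1
  · rw [one_mul]
    congr 1
    · apply congrArg
      apply List.map_congr_left
      intro i hi
      apply congrArg
      apply List.map_congr_left
      intro j hj
      rw [PySem.List.mem_pyRange_one] at hi hj
      rw [pv_if_L p q r i hi.1 hi.2, pv_if_L p q r j (by omega) hj.2]
    · apply congrArg
      apply List.map_congr_left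
      intro i hi
      rw [PySem.List.mem_pyRange_one] at hi
      rw [pv_if_L p q r i hi.1 hi.2]
  · rw [one_mul]
    congr 1
    · apply congrArg
      apply List.map_congr_left
      intro i hi
      apply congrArg
      apply List.map_congr_left
      intro j hj
      rw [PySem.List.mem_pyRange_one] at hi hj
      rw [pv_if_P r i hi.1 hi.2, pv_if_P r j (by omega) hj.2]
    · apply congrArg
      apply List.map_congr_left
      intro i hi
      rw [PySem.List.mem_pyRange_one] at hi
      rw [pv_if_P r i hi.1 hi.2]

/-- closed product form of B's result -/
theorem pv_B_closed (p q r : Int) :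
    dim_B_py_alt p q r =
      PySem.Int.floordiv
        (pvLf p q r 1 * pvLf p q r 2 * (pvLf p q r 1 * pvLf p q r 1 - pvLf p q r 2 * pvLf p q r 2)
          * ((PySem.List.pyRange 3 (r+1) 1).map (fun j =>
              (pvLf p q r 1 * pvLf p q r 1 - pvPf r j * pvPf r j)
                * (pvLf p q r 2 * pvLf p q r 2 - pvPf r j * pvPf r j))).prod)
        (pvPf r 1 * pvPf r 2 * (pvPf r 1 * pvPf r 1 - pvPf r 2 * pvPf r 2)
          * ((PySem.List.pyRange 3 (r+1) 1).map (fun j =>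
              (pvPf r 1 * pvPf r 1 - pvPf r j * pvPf r j)
                * (pvPf r 2 * pvPf r 2 - pvPf r j * pvPf r j))).prod) := by
  simp only [dim_B_py_alt]
  rw [pv_pairfold1]
  dsimp only
  simp only [pvLf, pvPf]
  norm_num
  congr 1 <;> ring_nf

theorem pv_fd_congr (n d n' d' k : Int) (hn : n = n' * k) (hd : d = d' * k)
    (hd' : 0 < d') (hk : 0 < k) :
    PySem.Int.floordiv n d = PySem.Int.floordiv n' d' := by
  subst hn; subst hd; exact pv_floordiv_cancel n' d' k hd' hk

theorem dim_B_py_spec : Claim_equal_dim_B_py := by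
  intro p q r _ hr
  unfold Pre_dim_B_py at hr
  unfold Spec_dim_B_py
  rw [pv_A_closed, pv_B_closed]
  have e1 : PySem.List.pyRange 1 (r+1) 1 = 1 :: PySem.List.pyRange 2 (r+1) 1 :=
    PySem.List.pyRange_one_cons (by omega)
  have e2 : PySem.List.pyRange 2 (r+1) 1 = 2 :: PySem.List.pyRange 3 (r+1) 1 :=
    PySem.List.pyRange_one_cons (by omega)
  rw [e1, e2]
  simp only [List.map_cons, List.prod_cons]
  norm_num
  rw [e2]
  simp only [List.map_cons, List.prod_cons]
  have hLP : ∀ j : Int, 3 ≤ j → pvLf p q r j = pvPf r j := by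
    intro j hj
    unfold pvLf
    rw [if_neg (by omega), if_neg (by omega)]
    ring
  have m1 : (PySem.List.pyRange 3 (r+1) 1).map
        (fun j => pvLf p q r 1 * pvLf p q r 1 - pvLf p q r j * pvLf p q r j)
      = (PySem.List.pyRange 3 (r+1) 1).map
        (fun j => pvLf p q r 1 * pvLf p q r 1 - pvPf r j * pvPf r j) :=
    List.map_congr_left fun j hj => by
      rw [hLP j (PySem.List.mem_pyRange_one.mp hj).1]
  have m2 : (PySem.List.pyRange 3 (r+1) 1).map
        (fun j => pvLf p q r 2 * pvLf p q r 2 - pvLf p q r j * pvLf p q r j)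
      = (PySem.List.pyRange 3 (r+1) 1).map
        (fun j => pvLf p q r 2 * pvLf p q r 2 - pvPf r j * pvPf r j) :=
    List.map_congr_left fun j hj => by
      rw [hLP j (PySem.List.mem_pyRange_one.mp hj).1]
  have m3 : (PySem.List.pyRange 3 (r+1) 1).map
        (fun i => ((PySem.List.pyRange (i+1) (r+1) 1).map
            (fun j => pvLf p q r i * pvLf p q r i - pvLf p q r j * pvLf p q r j)).prod)
      = (PySem.List.pyRange 3 (r+1) 1).map
        (fun i => ((PySem.List.pyRange (i+1) (r+1) 1).map
            (fun j => pvPf r i * pvPf r i - pvPf r j * pvPf r j)).prod) :=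
    List.map_congr_left fun i hi => congrArg List.prod <|
      List.map_congr_left fun j hj => by
        have hi3 : 3 ≤ i := (PySem.List.mem_pyRange_one.mp hi).1
        have hj3 : 3 ≤ j := by
          have := (PySem.List.mem_pyRange_one.mp hj).1
          omega
        rw [hLP i hi3, hLP j hj3]
  have m4 : (PySem.List.pyRange 3 (r+1) 1).map (pvLf p q r)
      = (PySem.List.pyRange 3 (r+1) 1).map (pvPf r) :=
    List.map_congr_left fun j hj => hLP j (PySem.List.mem_pyRange_one.mp hj).1
  rw [m1, m2, m3, m4]
  have hPfpos : ∀ k : Int, k ≤ r → 0 < pvPf r k := by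
    intro k hk; unfold pvPf; omega
  have hPflt : ∀ k k' : Int, k < k' → pvPf r k' < pvPf r k := by
    intro k k' h; unfold pvPf; omega
  have hsq : ∀ a b : Int, 0 < b → b < a → 0 < a * a - b * b := by
    intro a b h0 h; nlinarith
  refine pv_fd_congr _ _ _ _
      (((PySem.List.pyRange 3 (r+1) 1).map
          (fun i => ((PySem.List.pyRange (i+1) (r+1) 1).map
              (fun j => pvPf r i * pvPf r i - pvPf r j * pvPf r j)).prod)).prod
        * ((PySem.List.pyRange 3 (r+1) 1).map (pvPf r)).prod)
      (by ring) (by ring) ?_ ?_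
  · refine mul_pos (mul_pos (mul_pos (hPfpos 1 (by omega)) (hPfpos 2 (by omega)))
      (hsq _ _ (hPfpos 2 (by omega)) (hPflt 1 2 (by omega))))
      (mul_pos (pv_prod_pos _ _ ?_) (pv_prod_pos _ _ ?_)) <;>
    · intro x hx
      have hb := PySem.List.mem_pyRange_one.mp hx
      exact hsq _ _ (hPfpos x (by omega)) (hPflt _ x (by omega))
  · refine mul_pos (pv_prod_pos _ _ ?_) (pv_prod_pos _ _ ?_)
    · intro i hi
      have hbi := PySem.List.mem_pyRange_one.mp hi
      refine pv_prod_pos _ _ ?_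
      intro j hj
      have hbj := PySem.List.mem_pyRange_one.mp hj
      exact hsq _ _ (hPfpos j (by omega)) (hPflt i j (by omega))
    · intro j hj
      have hbj := PySem.List.mem_pyRange_one.mp hj
      exact hPfpos j (by omega)
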